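-- pv_equiv track=rewrite | github.com/MartinThoma/hwrt | hwrt/datasets/mathbrush.py | remove_matching_braces
-- ===== SOURCE A (Python) =====
-- def remove_matching_braces(latex):
--     """
--     If `latex` is surrounded by matching braces, remove them. They are not
--     necessary.
--
--     Parameters
--     ----------
--     latex : string
--
--     Returns
--     -------
--     string
--
--     Examples
--     --------
--     >>> remove_matching_braces('{2+2}')
--     '2+2'
--     >>> remove_matching_braces('{2+2')
--     '{2+2'
--     """
--     if latex.startswith('{') and latex.endswith('}'):
--         opened = 1
--         matches = True
--         for char in latex[1:-1]:
--             if char == '{':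
--                 opened += 1
--             elif char == '}':
--                 opened -= 1
--             if opened == 0:
--                 matches = False
--         if matches:
--             latex = latex[1:-1]
--     return latex
-- ===== SOURCE B (Python) =====
-- def remove_matching_braces(latex):
--     """If `latex` is surrounded by braces that match EACH OTHER, remove them.
--
--     Uses classic stack-based bracket matching over the whole string to find
--     the partner of the opening brace at index 0; the outer pair is removed
--     iff that partner is the final character.
--     """
--     if latex.startswith('{') and latex.endswith('}'):
--         stack = []
--         match_of_first = -1
--         for i, char in enumerate(latex):
--             if char == '{':
--                 stack.append(i)
--             elif char == '}' and stack:
--                 if stack.pop() == 0: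
--                     match_of_first = i
--         if match_of_first == len(latex) - 1:
--             return latex[1:-1]
--     return latex
-- ===== Notes on version B (the rewrite author's own statement) =====
-- stated objective: alternative
-- what changed: B replaces A's depth-counter-with-flag scan of the interior by classic stack-based bracket matching over the whole string: it pushes indices of opening braces, pops on closing braces, records the partner of the brace at index 0, and strips iff that partner is the last character.
-- intended difference: On strings that start with an opening brace and end with a closing brace, where the interior depth never drops to zero but the brace counts are unbalanced (witness {{} ), A strips the outer pair anyway and returns an unbalanced string, while B returns the input unchanged because the brace at index 0 does not actually match the final brace, which is what the docstring asks for. — e.g. on remove_matching_braces("{{}"): A returns "{", B returns "{{}"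
import Mathlib
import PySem

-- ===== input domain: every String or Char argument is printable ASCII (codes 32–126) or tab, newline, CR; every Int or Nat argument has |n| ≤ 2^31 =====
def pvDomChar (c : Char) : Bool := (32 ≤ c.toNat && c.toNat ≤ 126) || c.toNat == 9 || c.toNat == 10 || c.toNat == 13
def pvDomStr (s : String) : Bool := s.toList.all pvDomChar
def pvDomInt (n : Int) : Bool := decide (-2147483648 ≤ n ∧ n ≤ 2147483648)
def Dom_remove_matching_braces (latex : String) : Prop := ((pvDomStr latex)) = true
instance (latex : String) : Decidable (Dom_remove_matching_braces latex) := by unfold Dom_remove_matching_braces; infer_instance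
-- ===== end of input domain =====

-- B replaces A's depth-counter+flag interior scan by stack-based bracket matching (partner of the brace at index 0); on unbalanced inputs like '{{}' A strips anyway while B leaves them unchanged (stated as D_).


-- ===== PORT A =====
-- A's loop state: (opened, matches); matches is cleared whenever opened hits 0.
def rmbStepA (s : Int × Bool) (c : Char) : Int × Bool :=
  let opened := if c = '{' then s.1 + 1 else if c = '}' then s.1 - 1 else s.1
  (opened, if opened = 0 then false else s.2)

def remove_matching_braces (latex : String) : String :=
  if PySem.Str.startswith latex "{" && PySem.Str.endswith latex "}" then
    let interior := PySem.Str.slice latex (some 1) (some (-1))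
    let st := interior.toList.foldl rmbStepA (1, true)
    if st.2 then interior else latex
  else latex

-- ===== PORT B =====
-- B's loop state: (stack of indices of unmatched '{', match_of_first); Python pushes/pops at the list's end.
def rmbStepB (st : List Int × Int) (p : Int × Char) : List Int × Int :=
  if p.2 = '{' then (st.1 ++ [p.1], st.2)
  else if p.2 = '}' ∧ st.1 ≠ [] then
    (st.1.dropLast, if st.1.getLast! = 0 then p.1 else st.2)
  else st

def remove_matching_braces_alt (latex : String) : String :=
  if PySem.Str.startswith latex "{" && PySem.Str.endswith latex "}" then
    let st := (PySem.List.enumerate latex.toList 0).foldl rmbStepB ([], -1)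
    if st.2 = (PySem.Str.len latex : Int) - 1 then
      PySem.Str.slice latex (some 1) (some (-1))
    else latex
  else latex

-- ===== PRECONDITION & SPEC =====
-- On strings that start with an opening brace and end with a closing brace, where the interior
-- depth never drops to zero but the brace counts are unbalanced (witness {{} ), A strips the outer
-- pair anyway and returns an unbalanced string, while B returns the input unchanged because the
-- brace at index 0 does not actually match the final brace, which is what the docstring asks for.
def D_remove_matching_braces (latex : String) : Prop :=
  PySem.Str.startswith latex "{" ∧ PySem.Str.endswith latex "}" ∧
  latex.toList.count '{' ≠ latex.toList.count '}' ∧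
  ∀ k < latex.toList.tail.length,
    (latex.toList.tail.take k).count '}' ≤ (latex.toList.tail.take k).count '{'
instance (latex : String) : Decidable (D_remove_matching_braces latex) := by
  unfold D_remove_matching_braces; infer_instance

def Spec_remove_matching_braces (latex : String) (out : String) : Prop :=
  ¬ D_remove_matching_braces latex → out = remove_matching_braces_alt latex
instance (latex : String) (out : String) : Decidable (Spec_remove_matching_braces latex out) := by
  unfold Spec_remove_matching_braces; infer_instance

def pvDiffWitness_remove_matching_braces : String := "{{}"
def pvDiffWitnessOut_remove_matching_braces : String × String := ("{", "{{}")

-- ===== CLAIM (what is proved, stated in full; the proofs are below) =====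
def Claim_unchanged_remove_matching_braces : Prop := ∀ (latex : String), Dom_remove_matching_braces latex → Spec_remove_matching_braces latex (remove_matching_braces latex)
def Claim_changed_remove_matching_braces : Prop := Dom_remove_matching_braces (pvDiffWitness_remove_matching_braces) ∧ D_remove_matching_braces (pvDiffWitness_remove_matching_braces) ∧ remove_matching_braces (pvDiffWitness_remove_matching_braces) = pvDiffWitnessOut_remove_matching_braces.1 ∧ remove_matching_braces_alt (pvDiffWitness_remove_matching_braces) = pvDiffWitnessOut_remove_matching_braces.2 ∧ pvDiffWitnessOut_remove_matching_braces.1 ≠ pvDiffWitnessOut_remove_matching_braces.2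
def Claim_exact_remove_matching_braces : Prop := ∀ (latex : String), Dom_remove_matching_braces latex → D_remove_matching_braces latex → remove_matching_braces latex ≠ remove_matching_braces_alt latex

-- ===== LEMMAS AND PROOFS =====

-- +1 for '{', -1 for '}', 0 otherwise (the brace-balance step used by the proofs).
def rmbDelta (c : Char) : Int :=
  (if c = '{' then 1 else 0) - (if c = '}' then 1 else 0)

theorem rmb_getLast!_mem (s : List Int) (h : s ≠ []) : s.getLast! ∈ s := by
  cases s with
  | nil => exact absurd rfl h
  | cons a t => simp only [List.getLast!]; exact List.getLast_mem _

theorem rmb_nozero (ps : List (Int × Char)) (s : List Int) (m : Int)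
    (hs : ∀ x ∈ s, x ≠ 0) (hp : ∀ p ∈ ps, p.1 ≠ 0) :
    (∀ x ∈ (ps.foldl rmbStepB (s, m)).1, x ≠ 0) ∧
      ((ps.foldl rmbStepB (s, m)).2 = m ∨ ∃ p ∈ ps, (ps.foldl rmbStepB (s, m)).2 = p.1) := by
  induction ps generalizing s m with
  | nil => exact ⟨hs, Or.inl rfl⟩
  | cons p ps ih =>
    simp only [List.foldl_cons]
    have hstep : (rmbStepB (s, m) p).2 = m ∧ ∀ x ∈ (rmbStepB (s, m) p).1, x ≠ 0 := by
      unfold rmbStepB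
      by_cases h1 : p.2 = '{'
      · rw [if_pos h1]
        refine ⟨rfl, ?_⟩
        intro x hx
        rcases List.mem_append.mp hx with hx | hx
        · exact hs x hx
        · simp at hx; subst hx; exact hp p (List.mem_cons_self ..)
      · rw [if_neg h1]
        by_cases h2 : p.2 = '}' ∧ (s, m).1 ≠ []
        · rw [if_pos h2]
          have hL := rmb_getLast!_mem s h2.2
          exact ⟨by simp only; rw [if_neg (hs _ hL)], fun x hx => hs x (List.dropLast_subset _ hx)⟩
        · rw [if_neg h2]
          exact ⟨rfl, hs⟩
    obtain ⟨h2, h1⟩ := hstep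
    have := ih (rmbStepB (s, m) p).1 (rmbStepB (s, m) p).2 h1
      (fun q hq => hp q (List.mem_cons_of_mem _ hq))
    refine ⟨this.1, ?_⟩
    rcases this.2 with h | ⟨q, hq, hq2⟩
    · exact Or.inl (h.trans h2)
    · exact Or.inr ⟨q, List.mem_cons_of_mem _ hq, hq2⟩

theorem rmb_safe (ps : List (Int × Char)) (t : List Int) (m : Int)
    (hp : ∀ p ∈ ps, p.1 ≠ 0) (ht : ∀ x ∈ t, x ≠ 0)
    (hbal : ∀ y ∈ List.scanl (fun a c => a + rmbDelta c) ((t.length : Int) + 1) (ps.map (·.2)), 1 ≤ y) :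
    ∃ t', ps.foldl rmbStepB (0 :: t, m) = (0 :: t', m) ∧ (∀ x ∈ t', x ≠ 0) ∧
      ((t'.length : Int) = (t.length : Int) + (ps.map (fun p => rmbDelta p.2)).sum) := by
  induction ps generalizing t m with
  | nil => exact ⟨t, rfl, ht, by simp⟩
  | cons p ps ih =>
    simp only [List.map_cons, List.scanl_cons, List.mem_cons, List.sum_cons] at hbal ⊢
    simp only [List.foldl_cons]
    by_cases h1 : p.2 = '{'
    · have hstep : rmbStepB (0 :: t, m) p = (0 :: (t ++ [p.1]), m) := by
        unfold rmbStepB; rw [if_pos h1]; simp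
      rw [hstep]
      have ht' : ∀ x ∈ t ++ [p.1], x ≠ 0 := by
        intro x hx
        rcases List.mem_append.mp hx with hx | hx
        · exact ht x hx
        · simp at hx; subst hx; exact hp p (List.mem_cons_self ..)
      have hd : rmbDelta p.2 = 1 := by simp [rmbDelta, h1]
      obtain ⟨t', h⟩ := ih (t ++ [p.1]) m (fun q hq => hp q (List.mem_cons_of_mem _ hq)) ht'
        (by intro y hy
            apply hbal
            right
            have : ((t ++ [p.1]).length : Int) + 1 = (t.length : Int) + 1 + rmbDelta p.2 := by
              simp only [List.length_append, List.length_cons, List.length_nil, hd]; push_cast; omega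
            rwa [this] at hy)
      exact ⟨t', h.1, h.2.1, by rw [h.2.2]; simp only [List.length_append, List.length_cons, List.length_nil, hd]; push_cast; omega⟩
    · by_cases h2 : p.2 = '}'
      · have hd : rmbDelta p.2 = -1 := by simp [rmbDelta, h2]
        have htne : t ≠ [] := by
          rintro rfl
          have := hbal ((0 : Int) + 1 + rmbDelta p.2) (Or.inr (by
            cases hps : ps.map (·.2) <;> simp [List.scanl_cons]))
          omega
        have hstep : rmbStepB (0 :: t, m) p = (0 :: t.dropLast, m) := by
          unfold rmbStepB
          rw [if_neg h1, if_pos ⟨h2, by simp⟩]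
          have : (0 :: t).getLast! = t.getLast! := by
            cases t with
            | nil => exact absurd rfl htne
            | cons a s => simp [List.getLast!, List.getLast_cons]
          rw [this]
          simp only
          rw [if_neg (ht _ (rmb_getLast!_mem t htne))]
          rw [List.dropLast_cons_of_ne_nil htne]
        rw [hstep]
        have hlen : (t.dropLast.length : Int) + 1 = (t.length : Int) + 1 + rmbDelta p.2 := by
          have hld : t.dropLast.length = t.length - 1 := List.length_dropLast
          have h0 : 0 < t.length := List.length_pos_of_ne_nil htne
          rw [hld, hd]
          omega
        obtain ⟨t', h⟩ := ih t.dropLast m (fun q hq => hp q (List.mem_cons_of_mem _ hq))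
          (fun x hx => ht x (List.dropLast_subset _ hx))
          (by intro y hy; apply hbal; right; rwa [hlen] at hy)
        refine ⟨t', h.1, h.2.1, ?_⟩
        rw [h.2.2, hd]
        have hld : t.dropLast.length = t.length - 1 := List.length_dropLast
        have h0 : 0 < t.length := List.length_pos_of_ne_nil htne
        rw [hld]
        omega
      · have hd : rmbDelta p.2 = 0 := by unfold rmbDelta; rw [if_neg h1, if_neg h2]; norm_num
        have hstep : rmbStepB (0 :: t, m) p = (0 :: t, m) := by
          unfold rmbStepB
          rw [if_neg h1, if_neg (by rintro ⟨hc, _⟩; exact h2 hc)]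
        rw [hstep]
        obtain ⟨t', h⟩ := ih t m (fun q hq => hp q (List.mem_cons_of_mem _ hq)) ht
          (by intro y hy; apply hbal; right
              have heq : (t.length : Int) + 1 + rmbDelta p.2 = (t.length : Int) + 1 := by rw [hd]; ring
              rw [heq]; exact hy)
        exact ⟨t', h.1, h.2.1, by rw [h.2.2, hd]; ring⟩

theorem rmb_fail (ps : List (Int × Char)) (t : List Int) (m : Int)
    (hp : ∀ p ∈ ps, p.1 ≠ 0) (ht : ∀ x ∈ t, x ≠ 0)
    (hbal : ∃ y ∈ List.scanl (fun a c => a + rmbDelta c) ((t.length : Int) + 1) (ps.map (·.2)), y < 1) :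
    (∀ x ∈ (ps.foldl rmbStepB (0 :: t, m)).1, x ≠ 0) ∧
      ((ps.foldl rmbStepB (0 :: t, m)).2 = m ∨ ∃ p ∈ ps, (ps.foldl rmbStepB (0 :: t, m)).2 = p.1) := by
  induction ps generalizing t m with
  | nil =>
    obtain ⟨y, hy, hlt⟩ := hbal
    simp at hy
    omega
  | cons p ps ih =>
    obtain ⟨y, hy, hlt⟩ := hbal
    simp only [List.map_cons, List.scanl_cons, List.mem_cons] at hy
    have hytail : y ∈ List.scanl (fun a c => a + rmbDelta c)
        ((t.length : Int) + 1 + rmbDelta p.2) (ps.map (·.2)) := by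
      rcases hy with rfl | hy
      · omega
      · exact hy
    simp only [List.foldl_cons]
    by_cases h1 : p.2 = '{'
    · have hd : rmbDelta p.2 = 1 := by simp [rmbDelta, h1]
      have hstep : rmbStepB (0 :: t, m) p = (0 :: (t ++ [p.1]), m) := by
        unfold rmbStepB; rw [if_pos h1]; simp
      rw [hstep]
      have ht' : ∀ x ∈ t ++ [p.1], x ≠ 0 := by
        intro x hx
        rcases List.mem_append.mp hx with hx | hx
        · exact ht x hx
        · simp at hx; subst hx; exact hp p (List.mem_cons_self ..)
      have := ih (t ++ [p.1]) m (fun q hq => hp q (List.mem_cons_of_mem _ hq)) ht'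
        ⟨y, by
          have heq : ((t ++ [p.1]).length : Int) + 1 = (t.length : Int) + 1 + rmbDelta p.2 := by
            simp only [List.length_append, List.length_cons, List.length_nil, hd]; push_cast; omega
          rw [heq]; exact hytail, hlt⟩
      refine ⟨this.1, ?_⟩
      rcases this.2 with h | ⟨q, hq, hq2⟩
      · exact Or.inl h
      · exact Or.inr ⟨q, List.mem_cons_of_mem _ hq, hq2⟩
    · by_cases h2 : p.2 = '}'
      · have hd : rmbDelta p.2 = -1 := by simp [rmbDelta, h2]
        rcases List.eq_nil_or_concat' t with rfl | ⟨t0, a, rfl⟩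
        · -- t = []: the 0 is popped here, m becomes p.1; afterwards rmb_nozero applies
          have hstep : rmbStepB (0 :: ([] : List Int), m) p = ([], p.1) := by
            unfold rmbStepB
            rw [if_neg h1, if_pos ⟨h2, by simp⟩]
            simp [List.getLast!]
          rw [hstep]
          have := rmb_nozero ps [] p.1 (by simp) (fun q hq => hp q (List.mem_cons_of_mem _ hq))
          refine ⟨this.1, ?_⟩
          rcases this.2 with h | ⟨q, hq, hq2⟩
          · exact Or.inr ⟨p, List.mem_cons_self .., h⟩
          · exact Or.inr ⟨q, List.mem_cons_of_mem _ hq, hq2⟩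
        · -- t = t0 ++ [a]: pop a ≠ 0
          have htne : t0 ++ [a] ≠ ([] : List Int) := by simp
          have hstep : rmbStepB (0 :: (t0 ++ [a]), m) p = (0 :: t0, m) := by
            unfold rmbStepB
            rw [if_neg h1, if_pos ⟨h2, by simp⟩]
            have hgl : (0 :: (t0 ++ [a])).getLast! = a := by
              simp [List.getLast!]
            rw [hgl]
            simp only
            rw [if_neg (ht a (by simp))]
            have hdl : (0 :: (t0 ++ [a])).dropLast = 0 :: t0 := by
              rw [show (0 :: (t0 ++ [a])) = (0 :: t0) ++ [a] from by simp]
              exact List.dropLast_concat ..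
            rw [hdl]
          rw [hstep]
          have := ih t0 m (fun q hq => hp q (List.mem_cons_of_mem _ hq))
            (fun x hx => ht x (by simp [hx]))
            ⟨y, by
              have heq : (t0.length : Int) + 1 = ((t0 ++ [a]).length : Int) + 1 + rmbDelta p.2 := by
                simp only [List.length_append, List.length_cons, List.length_nil, hd]; push_cast; omega
              rw [heq]; exact hytail, hlt⟩
          refine ⟨this.1, ?_⟩
          rcases this.2 with h | ⟨q, hq, hq2⟩
          · exact Or.inl h
          · exact Or.inr ⟨q, List.mem_cons_of_mem _ hq, hq2⟩
      · have hd : rmbDelta p.2 = 0 := by unfold rmbDelta; rw [if_neg h1, if_neg h2]; norm_num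
        have hstep : rmbStepB (0 :: t, m) p = (0 :: t, m) := by
          unfold rmbStepB
          rw [if_neg h1, if_neg (by rintro ⟨hc, _⟩; exact h2 hc)]
        rw [hstep]
        have := ih t m (fun q hq => hp q (List.mem_cons_of_mem _ hq)) ht
          ⟨y, by
            have heq : (t.length : Int) + 1 = (t.length : Int) + 1 + rmbDelta p.2 := by
              rw [hd]; ring
            rw [heq]; exact hytail, hlt⟩
        refine ⟨this.1, ?_⟩
        rcases this.2 with h | ⟨q, hq, hq2⟩
        · exact Or.inl h
        · exact Or.inr ⟨q, List.mem_cons_of_mem _ hq, hq2⟩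

theorem rmb_B_iff (mid : List Char) :
    ((PySem.List.enumerate ('{' :: (mid ++ ['}'])) 0).foldl rmbStepB ([], -1)).2
        = (mid.length : Int) + 1 ↔
      ((∀ y ∈ List.scanl (fun a c => a + rmbDelta c) 1 mid, 1 ≤ y) ∧
        (mid.map rmbDelta).sum = 0) := by
  have henum : PySem.List.enumerate ('{' :: (mid ++ ['}'])) 0
      = (0, '{') :: (PySem.List.enumerate mid 1 ++ [(((1 : Int) + mid.length), '}')]) := by
    rw [PySem.List.enumerate_cons, PySem.List.enumerate_append]
    simp [PySem.List.enumerate_cons]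
  have hp : ∀ p ∈ PySem.List.enumerate mid 1, p.1 ≠ 0 ∧ p.1 < (mid.length : Int) + 1 := by
    intro p hp
    obtain ⟨k, hk, rfl⟩ := (PySem.List.mem_enumerate_iff ..).mp hp
    constructor
    · simp only; omega
    · simp only; omega
  have hfirst : rmbStepB ([], -1) (0, '{') = (0 :: ([] : List Int), -1) := by
    simp [rmbStepB]
  have hsnd : (PySem.List.enumerate mid 1).map (·.2) = mid := PySem.List.map_snd_enumerate ..
  rw [henum, List.foldl_cons, hfirst, List.foldl_append]
  by_cases hP : ∀ y ∈ List.scanl (fun a c => a + rmbDelta c) 1 mid, 1 ≤ y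
  · obtain ⟨t', hfold, ht', hlen⟩ := rmb_safe (PySem.List.enumerate mid 1) [] (-1)
      (fun p hq => (hp p hq).1) (by simp)
      (by simpa [hsnd] using hP)
    rw [hfold]
    have hsum : ((PySem.List.enumerate mid 1).map (fun p => rmbDelta p.2)).sum
        = (mid.map rmbDelta).sum := by
      rw [show (fun p : Int × Char => rmbDelta p.2) = rmbDelta ∘ (·.2) from rfl,
        ← List.map_map, hsnd]
    rw [hsum] at hlen
    simp only [List.length_nil, Nat.cast_zero, zero_add] at hlen
    by_cases hS : (mid.map rmbDelta).sum = 0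
    · have ht'nil : t' = [] := by
        rw [hS] at hlen
        exact List.eq_nil_of_length_eq_zero (by exact_mod_cast hlen)
      subst ht'nil
      have : List.foldl rmbStepB (0 :: ([] : List Int), -1)
          [(((1 : Int) + mid.length), '}')] = ([], (1 : Int) + mid.length) := by
        simp [rmbStepB, List.getLast!]
      rw [this]
      simp only
      constructor
      · intro _; exact ⟨hP, hS⟩
      · intro _; omega
    · have ht'ne : t' ≠ [] := by
        rintro rfl
        simp at hlen
        exact hS hlen.symm
      have hgl : (0 :: t').getLast! = t'.getLast! := by
        cases t' with
        | nil => exact absurd rfl ht'ne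
        | cons a s => simp [List.getLast!, List.getLast_cons]
      have hstep : List.foldl rmbStepB (0 :: t', -1)
          [(((1 : Int) + mid.length), '}')] = ((0 :: t').dropLast, -1) := by
        simp only [List.foldl_cons, List.foldl_nil]
        unfold rmbStepB
        rw [if_neg (by simp), if_pos ⟨rfl, by simp⟩]
        rw [hgl]
        simp only
        rw [if_neg (ht' _ (rmb_getLast!_mem t' ht'ne))]
      rw [hstep]
      simp only
      constructor
      · intro h; omega
      · rintro ⟨_, hS'⟩; exact absurd hS' hS
  · push_neg at hP
    obtain ⟨y, hy, hlt⟩ := hP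
    have hfail := rmb_fail (PySem.List.enumerate mid 1) [] (-1)
      (fun p hq => (hp p hq).1) (by simp)
      ⟨y, by simpa [hsnd] using hy, by omega⟩
    obtain ⟨hs', hm'⟩ := hfail
    set st := (PySem.List.enumerate mid 1).foldl rmbStepB (0 :: ([] : List Int), -1) with hst
    have hm'ne : st.2 ≠ (mid.length : Int) + 1 := by
      rcases hm' with h | ⟨q, hq, hq2⟩
      · rw [h]; omega
      · rw [hq2]
        have := (hp q hq).2
        omega
    have hfinal : (List.foldl rmbStepB st [(((1 : Int) + mid.length), '}')]).2 = st.2 := by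
      simp only [List.foldl_cons, List.foldl_nil]
      unfold rmbStepB
      rw [if_neg (by simp)]
      by_cases hse : st.1 = []
      · rw [if_neg (by rintro ⟨_, hne⟩; exact hne hse)]
      · rw [if_pos ⟨rfl, hse⟩]
        simp only
        rw [if_neg (hs' _ (rmb_getLast!_mem st.1 hse))]
    rw [hfinal]
    constructor
    · intro h; exact absurd h hm'ne
    · rintro ⟨hP', _⟩
      exact absurd (hP' y hy) (by omega)

theorem rmb_foldA_false (cs : List Char) (o : Int) :
    (cs.foldl rmbStepA (o, false)).2 = false := by
  induction cs generalizing o with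
  | nil => rfl
  | cons c cs ih =>
    simp only [List.foldl_cons]
    have : rmbStepA (o, false) c = ((rmbStepA (o, false) c).1, false) := by
      simp [rmbStepA]
    rw [this]; exact ih _

theorem rmb_stepA_fst (s : Int × Bool) (c : Char) : (rmbStepA s c).1 = s.1 + rmbDelta c := by
  unfold rmbStepA rmbDelta
  by_cases h1 : c = '{' <;> by_cases h2 : c = '}' <;> simp_all <;> omega

theorem rmb_foldA_iff (cs : List Char) (o : Int) (ho : 1 ≤ o) :
    (cs.foldl rmbStepA (o, true)).2 = true ↔
      ∀ y ∈ List.scanl (fun a c => a + rmbDelta c) o cs, 1 ≤ y := by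
  induction cs generalizing o with
  | nil => simpa using ho
  | cons c cs ih =>
    have hfst := rmb_stepA_fst (o, true) c
    have hb : -1 ≤ rmbDelta c ∧ rmbDelta c ≤ 1 := by unfold rmbDelta; split_ifs <;> omega
    have hs : List.scanl (fun a c => a + rmbDelta c) o (c :: cs)
        = o :: List.scanl (fun a c => a + rmbDelta c) (o + rmbDelta c) cs := List.scanl_cons ..
    have hmem : o + rmbDelta c ∈ List.scanl (fun a c => a + rmbDelta c) (o + rmbDelta c) cs := by
      cases cs <;> simp [List.scanl_cons]
    simp only [List.foldl_cons, hs, List.mem_cons]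
    by_cases h0 : o + rmbDelta c = 0
    · have hstep : rmbStepA (o, true) c = (o + rmbDelta c, false) := by
        unfold rmbStepA at hfst ⊢
        simp only at hfst
        simp [hfst, h0]
      rw [hstep]
      simp only [rmb_foldA_false]
      constructor
      · intro h; cases h
      · intro h
        have := h (o + rmbDelta c) (Or.inr hmem)
        omega
    · have ho' : 1 ≤ o + rmbDelta c := by omega
      have hstep : rmbStepA (o, true) c = (o + rmbDelta c, true) := by
        unfold rmbStepA at hfst ⊢
        simp only at hfst
        simp [hfst, h0]
      rw [hstep, ih _ ho']
      constructor
      · intro h y hy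
        rcases hy with rfl | hy
        · exact ho
        · exact h y hy
      · intro h y hy
        exact h y (Or.inr hy)

theorem rmb_slice_list (xs : List Char) :
    PySem.List.slice xs (some 1) (some (-1)) = xs.tail.dropLast := by
  cases xs with
  | nil => rfl
  | cons a l =>
    simp [PySem.List.slice, PySem.List.clampIdx, List.dropLast_eq_take]
    split_ifs <;> omega

theorem rmb_slice (latex : String) :
    (PySem.Str.slice latex (some 1) (some (-1))).toList = latex.toList.tail.dropLast := by
  simp [pysem]
  exact rmb_slice_list _

theorem rmb_split (latex : String)
    (h1 : PySem.Str.startswith latex "{" = true) (h2 : PySem.Str.endswith latex "}" = true) :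
    latex.toList = '{' :: latex.toList.tail.dropLast ++ ['}'] := by
  obtain ⟨u, hu⟩ := (PySem.Chars.startswith_iff latex.toList "{".toList).mp
    (by simpa [PySem.Str.startswith] using h1)
  obtain ⟨v, hv⟩ := (PySem.Chars.endswith_iff latex.toList "}".toList).mp
    (by simpa [PySem.Str.endswith] using h2)
  simp only [show ("{".toList) = ['{'] from rfl, List.singleton_append] at hu
  simp only [show ("}".toList) = ['}'] from rfl] at hv
  rw [← hu] at hv ⊢
  have hune : u ≠ [] := by
    rintro rfl
    rcases v with _ | ⟨c, v⟩ <;> simp at hv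
  have hq := congrArg List.getLast? hv
  simp only [List.getLast?_append, List.getLast?_singleton] at hq
  have h5 : u.getLast? = some '}' := by
    rcases u with _ | ⟨c, u⟩
    · exact absurd rfl hune
    · simpa [List.getLast?_cons_cons] using hq.symm
  have hlast : u.getLast hune = '}' :=
    Option.some.inj ((List.getLast?_eq_some_getLast hune).symm.trans h5)
  have hd := List.dropLast_append_getLast hune
  conv_lhs => rw [show u = u.dropLast ++ [u.getLast hune] from hd.symm]
  simp [hlast]

theorem rmb_count_sum (l : List Char) :
    (l.map rmbDelta).sum = (l.count '{' : Int) - (l.count '}' : Int) := by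
  induction l with
  | nil => simp
  | cons c l ih =>
    simp only [List.map_cons, List.sum_cons, List.count_cons, ih]
    by_cases h1 : c = '{' <;> by_cases h2 : c = '}' <;>
      simp [rmbDelta, h1, h2] <;> push_cast <;> ring

theorem rmb_scanl_iff (l : List Char) (b : Int) :
    (∀ y ∈ List.scanl (fun a c => a + rmbDelta c) b l, 1 ≤ y) ↔
      (∀ j ≤ l.length, 1 ≤ b + ((l.take j).map rmbDelta).sum) := by
  induction l generalizing b with
  | nil => simp
  | cons c l ih =>
    rw [List.scanl_cons, List.forall_mem_cons, ih (b + rmbDelta c)]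
    constructor
    · rintro ⟨hb, h⟩ j hj
      cases j with
      | zero => simpa using hb
      | succ i =>
        have := h i (by simpa using hj)
        simp only [List.take_succ_cons, List.map_cons, List.sum_cons] at *
        omega
    · intro h
      refine ⟨by simpa using h 0 (by omega), ?_⟩
      intro j hj
      have := h (j + 1) (by simp only [List.length_cons]; omega)
      simp only [List.take_succ_cons, List.map_cons, List.sum_cons] at this
      omega

theorem rmb_D_char (latex : String)
    (hsplit : latex.toList = '{' :: latex.toList.tail.dropLast ++ ['}'])
    (h1 : PySem.Str.startswith latex "{" = true) (h2 : PySem.Str.endswith latex "}" = true) :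
    D_remove_matching_braces latex ↔
      ((∀ y ∈ List.scanl (fun a c => a + rmbDelta c) 1 latex.toList.tail.dropLast, 1 ≤ y) ∧
        (latex.toList.tail.dropLast.map rmbDelta).sum ≠ 0) := by
  set mid := latex.toList.tail.dropLast with hmid
  have hsplit' : latex.toList = '{' :: (mid ++ ['}']) := by rw [hsplit, List.cons_append]
  have htail : latex.toList.tail = mid ++ ['}'] := by rw [hsplit']; rfl
  have hcount : (latex.toList.count '{' ≠ latex.toList.count '}') ↔
      ((mid.map rmbDelta).sum ≠ 0) := by
    rw [hsplit', rmb_count_sum]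
    simp only [List.count_cons, List.count_append, List.count_nil, List.count_singleton]
    constructor <;> intro h <;> intro hx <;> apply h <;> revert hx <;> simp <;> omega
  have hpref : (∀ k < latex.toList.tail.length,
        (latex.toList.tail.take k).count '}' ≤ (latex.toList.tail.take k).count '{') ↔
      (∀ y ∈ List.scanl (fun a c => a + rmbDelta c) 1 mid, 1 ≤ y) := by
    rw [rmb_scanl_iff mid 1, htail]
    simp only [List.length_append, List.length_cons, List.length_nil]
    constructor
    · intro h j hj
      have := h j (by omega)
      rw [List.take_append_of_le_length hj] at this
      have hs := rmb_count_sum (mid.take j)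
      omega
    · intro h k hk
      have hk' : k ≤ mid.length := by omega
      have := h k hk'
      rw [List.take_append_of_le_length hk']
      have hs := rmb_count_sum (mid.take k)
      omega
  unfold D_remove_matching_braces
  rw [hcount, hpref]
  constructor
  · rintro ⟨_, _, hS, hP⟩; exact ⟨hP, hS⟩
  · rintro ⟨hP, hS⟩; exact ⟨h1, h2, hS, hP⟩

theorem rmb_spec (latex : String) (hD : ¬ D_remove_matching_braces latex) :
    remove_matching_braces latex = remove_matching_braces_alt latex := by
  simp only [remove_matching_braces, remove_matching_braces_alt]
  by_cases hc : (PySem.Str.startswith latex "{" && PySem.Str.endswith latex "}") = true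
  · obtain ⟨h1, h2⟩ := Bool.and_eq_true_iff.mp hc
    rw [if_pos hc, if_pos hc]
    have hsplit := rmb_split latex h1 h2
    set mid := latex.toList.tail.dropLast with hmid
    have hN : (PySem.Str.len latex : Int) - 1 = (mid.length : Int) + 1 := by
      rw [PySem.Str.len_eq, hsplit]
      simp only [List.length_cons, List.length_append, List.length_singleton, List.length_nil]
      push_cast
      omega
    have hAint : (PySem.Str.slice latex (some 1) (some (-1))).toList = mid := rmb_slice latex
    rw [hAint, hN, hsplit, List.cons_append]
    by_cases hP : ∀ y ∈ List.scanl (fun a c => a + rmbDelta c) 1 mid, 1 ≤ y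
    · by_cases hS : (mid.map rmbDelta).sum = 0
      · rw [if_pos ((rmb_foldA_iff mid 1 (by norm_num)).mpr hP),
          if_pos ((rmb_B_iff mid).mpr ⟨hP, hS⟩)]
      · exact absurd ((rmb_D_char latex hsplit h1 h2).mpr ⟨hP, hS⟩) hD
    · have hA : (mid.foldl rmbStepA (1, true)).2 = false := by
        cases h : (mid.foldl rmbStepA (1, true)).2
        · rfl
        · exact absurd ((rmb_foldA_iff mid 1 (by norm_num)).mp h) hP
      rw [hA]
      simp only [Bool.false_eq_true, if_false]
      rw [if_neg (fun h => hP ((rmb_B_iff mid).mp h).1)]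
  · rw [if_neg hc, if_neg hc]

theorem rmb_tight_h (latex : String) (hD : D_remove_matching_braces latex) :
    remove_matching_braces latex ≠ remove_matching_braces_alt latex := by
  have h1 := hD.1
  have h2 := hD.2.1
  have hc : (PySem.Str.startswith latex "{" && PySem.Str.endswith latex "}") = true := by
    rw [h1, h2]; rfl
  have hsplit := rmb_split latex h1 h2
  obtain ⟨hP, hS⟩ := (rmb_D_char latex hsplit h1 h2).mp hD
  set mid := latex.toList.tail.dropLast with hmid
  have hA : remove_matching_braces latex = PySem.Str.slice latex (some 1) (some (-1)) := by
    simp only [remove_matching_braces]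
    rw [if_pos hc]
    have hAint : (PySem.Str.slice latex (some 1) (some (-1))).toList = mid := rmb_slice latex
    rw [hAint, if_pos ((rmb_foldA_iff mid 1 (by norm_num)).mpr hP)]
  have hB : remove_matching_braces_alt latex = latex := by
    simp only [remove_matching_braces_alt]
    rw [if_pos hc]
    have hN : (PySem.Str.len latex : Int) - 1 = (mid.length : Int) + 1 := by
      rw [PySem.Str.len_eq, hsplit]
      simp only [List.length_cons, List.length_append, List.length_singleton, List.length_nil]
      push_cast
      omega
    rw [hN, hsplit, List.cons_append]
    rw [if_neg (fun h => hS ((rmb_B_iff mid).mp h).2)]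
  rw [hA, hB]
  intro he
  have h6 := congrArg String.toList he
  rw [rmb_slice latex, ← hmid, hsplit] at h6
  have h7 := congrArg List.length h6
  simp at h7
  omega

-- ===== VERDICT (by name: the statements are the Claim_ definitions above) =====
theorem remove_matching_braces_spec : Claim_unchanged_remove_matching_braces := by
  intro latex _ hD
  exact rmb_spec latex hD

theorem remove_matching_braces_changed : Claim_changed_remove_matching_braces := by
  unfold Claim_changed_remove_matching_braces; decide

theorem remove_matching_braces_tight : Claim_exact_remove_matching_braces := by
  intro latex _ hD
  exact rmb_tight_h latex hD
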